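-- pv_equiv track=rewrite | github.com/simonperneel/aw-watcher-window | aw_watcher_window/util.py | _map_title
-- ===== SOURCE A (Python) =====
-- title_to_cat_map = dict.fromkeys(['vrt nws', 'nieuwsblad', 'hln', 'de morgen', 'de standaard', 'de morgen', ' mo.be',
--                                   'knack', 'bbc ', 'the guardian', 'al jazeera', ' cnn', 'fox news', 'humo'],
--                                  'News')
--
-- def _map_title(title):
--     """
--     maps title to their broad category as defined in title_to_cat_map
--     if title not in mapping, return 'excluded'
--     """
--
--     for key in title_to_cat_map:
--         if key in title.lower():
--             title = title_to_cat_map.get(key)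
--             return title
--             break
--
--     # default when not tracked
--     title = 'excluded'
--
--     return title
-- ===== SOURCE B (Python) =====
-- _KEYWORDS = ('vrt nws', 'nieuwsblad', 'hln', 'de morgen', 'de standaard', ' mo.be',
--              'knack', 'bbc ', 'the guardian', 'al jazeera', ' cnn', 'fox news', 'humo')
--
--
-- def _map_title(title):
--     """Single left-to-right scan: at each position check whether any keyword starts there."""
--     text = title.lower()
--     for i in range(len(text) + 1):
--         for kw in _KEYWORDS:
--             if text.startswith(kw, i):
--                 return 'News'
--     return 'excluded'
-- ===== Notes on version B (the rewrite author's own statement) =====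
-- stated objective: alternative
-- what changed: Replaced the keyword-major loop (one substring search of the lowered title per dict key) by a single position-major left-to-right scan of the lowered title that checks at each position whether any keyword starts there, exploiting that every map value is the same category so match order is irrelevant.
import Mathlib
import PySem

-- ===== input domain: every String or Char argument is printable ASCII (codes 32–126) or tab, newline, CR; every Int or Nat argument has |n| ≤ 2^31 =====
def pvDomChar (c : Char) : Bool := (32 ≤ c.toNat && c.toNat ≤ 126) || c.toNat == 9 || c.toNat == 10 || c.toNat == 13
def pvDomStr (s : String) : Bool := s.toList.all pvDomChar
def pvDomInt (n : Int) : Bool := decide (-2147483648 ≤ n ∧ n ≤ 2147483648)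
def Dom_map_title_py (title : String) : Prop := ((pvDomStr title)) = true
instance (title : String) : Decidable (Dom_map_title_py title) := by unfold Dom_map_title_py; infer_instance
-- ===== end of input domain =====

-- B replaces A's per-keyword substring loop with one left-to-right positional scan
-- checking at each position whether any keyword starts there (objective: alternative).

-- ===== PORT A =====
-- dict.fromkeys([...], 'News')  (note the duplicated 'de morgen' in the source list)
def titleToCatMap : PySem.Dict String String :=
  (["vrt nws", "nieuwsblad", "hln", "de morgen", "de standaard", "de morgen", " mo.be",
    "knack", "bbc ", "the guardian", "al jazeera", " cnn", "fox news", "humo"]).foldl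
    (fun d k => d.insert k "News") PySem.Dict.empty

-- the 'for key in title_to_cat_map:' loop with its early return;
-- '.get(key)' always hits (key iterates the dict's own keys), so the getD default is unreachable
def aLoop (title : String) : List String → String
  | [] => "excluded"
  | key :: rest =>
    if PySem.Str.isIn key (PySem.Str.lower title) then
      PySem.Dict.getD titleToCatMap key ""
    else aLoop title rest

def map_title_py (title : String) : String :=
  aLoop title titleToCatMap.keys

-- ===== PORT B =====
def bKeywords : List String :=
  ["vrt nws", "nieuwsblad", "hln", "de morgen", "de standaard", " mo.be",
   "knack", "bbc ", "the guardian", "al jazeera", " cnn", "fox news", "humo"]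

-- the position loop 'for i in range(len(text)+1)': recursion on the suffix text[i:];
-- 'text.startswith(kw, i)' is Chars.startswith on that suffix; the inner keyword loop is .any
def altScan : List Char → String
  | [] =>
    if bKeywords.any (fun kw => PySem.Chars.startswith [] kw.toList) then "News" else "excluded"
  | c :: rest =>
    if bKeywords.any (fun kw => PySem.Chars.startswith (c :: rest) kw.toList) then "News"
    else altScan rest

def map_title_py_alt (title : String) : String :=
  altScan (PySem.Str.lower title).toList

-- ===== PRECONDITION & SPEC =====
def Spec_map_title_py (title : String) (out : String) : Prop := out = map_title_py_alt title
instance (title : String) (out : String) : Decidable (Spec_map_title_py title out) := by unfold Spec_map_title_py; infer_instance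

-- ===== CLAIM (what is proved, stated in full; the proofs are below) =====
def Claim_equal_map_title_py : Prop := ∀ (title : String), Dom_map_title_py title → Spec_map_title_py title (map_title_py title)

-- ===== LEMMAS AND PROOFS =====

-- A's loop returns 'News' iff some listed key occurs in the lowered title
theorem aLoop_eq (title : String) (ks : List String)
    (h : ∀ k ∈ ks, PySem.Dict.getD titleToCatMap k "" = "News") :
    aLoop title ks =
      if ks.any (fun k => PySem.Str.isIn k (PySem.Str.lower title)) then "News" else "excluded" := by
  induction ks with
  | nil => simp [aLoop]
  | cons k rest ih =>
    have hk := h k (by simp)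
    have hrest : ∀ k ∈ rest, PySem.Dict.getD titleToCatMap k "" = "News" :=
      fun x hx => h x (by simp [hx])
    rw [show aLoop title (k :: rest)
          = (if PySem.Str.isIn k (PySem.Str.lower title) then PySem.Dict.getD titleToCatMap k ""
             else aLoop title rest) from rfl]
    by_cases hin : PySem.Str.isIn k (PySem.Str.lower title) = true
    · rw [if_pos hin, hk]
      simp only [List.any_cons, hin, Bool.true_or, if_pos]
    · rw [if_neg hin, ih hrest]
      simp only [List.any_cons, Bool.eq_false_iff.mpr hin, Bool.false_or]

theorem isIn_cons (sub : List Char) (c : Char) (s : List Char) :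
    PySem.Chars.isIn sub (c :: s)
      = (PySem.Chars.startswith (c :: s) sub || PySem.Chars.isIn sub s) := by
  rcases hsw : PySem.Chars.startswith (c :: s) sub with _ | _
  · rcases hrec : PySem.Chars.isIn sub s with _ | _
    · simp only [Bool.or_false]
      rw [PySem.Chars.isIn_eq_false_iff, List.infix_cons_iff]
      push Not
      exact ⟨by rw [← PySem.Chars.startswith_iff, hsw]; simp,
             by rw [← PySem.Chars.isIn_iff_infix, hrec]; simp⟩
    · simp only [Bool.or_true]
      rw [PySem.Chars.isIn_iff_infix, List.infix_cons_iff]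
      exact Or.inr ((PySem.Chars.isIn_iff_infix _ _).mp hrec)
  · simp only [Bool.true_or]
    rw [PySem.Chars.isIn_iff_infix, List.infix_cons_iff]
    exact Or.inl ((PySem.Chars.startswith_iff _ _).mp hsw)

theorem any_orb (l : List String) (p q : String → Bool) :
    (l.any fun x => p x || q x) = (l.any p || l.any q) := by
  induction l with
  | nil => rfl
  | cons x xs ih => simp [List.any_cons, ih, Bool.or_assoc, Bool.or_left_comm]

-- B's positional scan computes the same 'some keyword occurs' test
theorem altScan_eq (s : List Char) :
    altScan s =
      if bKeywords.any (fun kw => PySem.Chars.isIn kw.toList s) then "News" else "excluded" := by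
  induction s with
  | nil => decide
  | cons c rest ih =>
    rw [altScan, ih]
    have hdist : (bKeywords.any fun kw => PySem.Chars.isIn kw.toList (c :: rest))
        = ((bKeywords.any fun kw => PySem.Chars.startswith (c :: rest) kw.toList)
           || (bKeywords.any fun kw => PySem.Chars.isIn kw.toList rest)) := by
      simp only [isIn_cons]
      exact any_orb bKeywords _ _
    rw [hdist]
    rcases (bKeywords.any fun kw => PySem.Chars.startswith (c :: rest) kw.toList) <;> simp

theorem keys_eq : titleToCatMap.keys = bKeywords := by decide

-- ===== VERDICT (by name: the statement is the Claim_ definition above) =====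
theorem map_title_py_spec : Claim_equal_map_title_py := by
  intro title _
  unfold Spec_map_title_py map_title_py map_title_py_alt
  rw [aLoop_eq title titleToCatMap.keys (by rw [keys_eq]; decide), keys_eq, altScan_eq]
  simp [PySem.Str.isIn]
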